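-- pv_equiv track=rewrite | github.com/sarigama-github/backend-repo_80tcucq7_gqibtn | main.py | recommendation_for
-- ===== SOURCE A (Python) =====
-- from typing import Optional, List
--
-- def recommendation_for(labels: List[str]) -> List[str]:
--     recs = []
--     for l in labels:
--         if "Nitrogen" in l:
--             recs.append("Apply nitrogen-rich fertilizer; consider split application before rainfall.")
--         elif "Water" in l:
--             recs.append("Increase irrigation frequency; check for clogged drip lines.")
--         elif "Fungal" in l or "Blight" in l or "Mildew" in l or "Rust" in l or "Leaf Spot" in l:
--             recs.append("Use a broad-spectrum fungicide and remove heavily infected leaves.")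
--         elif "Weed" in l:
--             recs.append("Apply pre-emergent herbicide and perform mechanical weeding.")
--         else:
--             recs.append("Scout the field and send a sample to lab for confirmation.")
--     return recs
-- ===== SOURCE B (Python) =====
-- from typing import List
--
-- _RULES = [
--     (["Nitrogen"], "Apply nitrogen-rich fertilizer; consider split application before rainfall."),
--     (["Water"], "Increase irrigation frequency; check for clogged drip lines."),
--     (["Fungal", "Blight", "Mildew", "Rust", "Leaf Spot"], "Use a broad-spectrum fungicide and remove heavily infected leaves."),
--     (["Weed"], "Apply pre-emergent herbicide and perform mechanical weeding."),
-- ]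
-- _RECS = [rec for _, rec in _RULES] + ["Scout the field and send a sample to lab for confirmation."]
--
-- def _category(l: str) -> int:
--     # exhaustively score every rule: set of indices of ALL matching rules, then argmin
--     matched = {i for i, (kws, _) in enumerate(_RULES) for k in kws if k in l}
--     return min(matched) if matched else len(_RULES)
--
-- def recommendation_for(labels: List[str]) -> List[str]:
--     return [_RECS[_category(l)] for l in labels]
-- ===== Notes on version B (the rewrite author's own statement) =====
-- stated objective: alternative
-- what changed: Instead of A's short-circuiting first-match if/elif cascade, B exhaustively scores every rule, collects the set of all matching rule indices, and indexes a recommendation table by the minimum matched index (argmin), with the default as highest index.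
import Mathlib
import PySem

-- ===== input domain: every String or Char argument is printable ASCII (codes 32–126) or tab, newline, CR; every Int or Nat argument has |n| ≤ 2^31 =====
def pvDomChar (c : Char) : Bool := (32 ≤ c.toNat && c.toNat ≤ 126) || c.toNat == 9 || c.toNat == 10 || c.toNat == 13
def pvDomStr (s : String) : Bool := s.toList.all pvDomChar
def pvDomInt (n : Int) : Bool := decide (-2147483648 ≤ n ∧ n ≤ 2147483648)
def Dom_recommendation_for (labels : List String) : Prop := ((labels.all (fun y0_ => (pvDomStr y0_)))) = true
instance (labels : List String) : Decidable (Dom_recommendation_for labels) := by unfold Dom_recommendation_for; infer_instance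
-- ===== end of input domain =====

-- B replaces A's short-circuiting if/elif cascade by an exhaustive match: collect the set of ALL matching rule indices and index a table by their minimum (objective: alternative).


-- ===== PORT A =====
def recommendation_for (labels : List String) : List String :=
  labels.foldl (fun recs l =>
    if PySem.Str.isIn "Nitrogen" l then
      recs ++ ["Apply nitrogen-rich fertilizer; consider split application before rainfall."]
    else if PySem.Str.isIn "Water" l then
      recs ++ ["Increase irrigation frequency; check for clogged drip lines."]
    else if PySem.Str.isIn "Fungal" l || PySem.Str.isIn "Blight" l || PySem.Str.isIn "Mildew" l
            || PySem.Str.isIn "Rust" l || PySem.Str.isIn "Leaf Spot" l then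
      recs ++ ["Use a broad-spectrum fungicide and remove heavily infected leaves."]
    else if PySem.Str.isIn "Weed" l then
      recs ++ ["Apply pre-emergent herbicide and perform mechanical weeding."]
    else
      recs ++ ["Scout the field and send a sample to lab for confirmation."]) []

-- ===== PORT B =====
def pvRules : List (List String × String) :=
  [ (["Nitrogen"], "Apply nitrogen-rich fertilizer; consider split application before rainfall."),
    (["Water"], "Increase irrigation frequency; check for clogged drip lines."),
    (["Fungal", "Blight", "Mildew", "Rust", "Leaf Spot"], "Use a broad-spectrum fungicide and remove heavily infected leaves."),
    (["Weed"], "Apply pre-emergent herbicide and perform mechanical weeding.") ]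

def pvRecs : List String :=
  pvRules.map (fun r => r.2) ++ ["Scout the field and send a sample to lab for confirmation."]

-- {i for i, (kws, _) in enumerate(_RULES) for k in kws if k in l}; min(...) if nonempty else len(_RULES)
def pvCategory (l : String) : Int :=
  let matched : PySem.Set Int :=
    PySem.Set.ofList ((PySem.List.enumerate pvRules 0).flatMap
      (fun ir => ir.2.1.filterMap (fun k => if PySem.Str.isIn k l then some ir.1 else none)))
  match PySem.List.min? matched (fun x => x) with
  | some m => m
  | none => (pvRules.length : Int)

def recommendation_for_alt (labels : List String) : List String :=
  -- _RECS[_category(l)]: the index is always in range 0..len(_RECS)-1, so pyGetD's default is never used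
  labels.map (fun l => PySem.List.pyGetD pvRecs (pvCategory l) "")

-- ===== PRECONDITION & SPEC =====
def Spec_recommendation_for (labels : List String) (out : List String) : Prop := out = recommendation_for_alt labels
instance (labels : List String) (out : List String) : Decidable (Spec_recommendation_for labels out) := by unfold Spec_recommendation_for; infer_instance

-- ===== CLAIM =====
def Claim_equal_recommendation_for : Prop := ∀ (labels : List String), Dom_recommendation_for labels → Spec_recommendation_for labels (recommendation_for labels)

-- ===== LEMMAS AND PROOFS =====

-- the per-label value A's cascade appends equals B's argmin table lookup
set_option maxHeartbeats 4000000 in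
theorem rec_step_eq (l : String) :
    (if PySem.Str.isIn "Nitrogen" l then
      "Apply nitrogen-rich fertilizer; consider split application before rainfall."
    else if PySem.Str.isIn "Water" l then
      "Increase irrigation frequency; check for clogged drip lines."
    else if PySem.Str.isIn "Fungal" l || PySem.Str.isIn "Blight" l || PySem.Str.isIn "Mildew" l
            || PySem.Str.isIn "Rust" l || PySem.Str.isIn "Leaf Spot" l then
      "Use a broad-spectrum fungicide and remove heavily infected leaves."
    else if PySem.Str.isIn "Weed" l then
      "Apply pre-emergent herbicide and perform mechanical weeding."
    else
      "Scout the field and send a sample to lab for confirmation.")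
    = PySem.List.pyGetD pvRecs (pvCategory l) "" := by
  cases h1 : PySem.Str.isIn "Nitrogen" l <;>
  cases h2 : PySem.Str.isIn "Water" l <;>
  cases h3 : PySem.Str.isIn "Fungal" l <;>
  cases h4 : PySem.Str.isIn "Blight" l <;>
  cases h5 : PySem.Str.isIn "Mildew" l <;>
  cases h6 : PySem.Str.isIn "Rust" l <;>
  cases h7 : PySem.Str.isIn "Leaf Spot" l <;>
  cases h8 : PySem.Str.isIn "Weed" l <;>
  simp_all [pvCategory, pvRules, pvRecs, PySem.List.enumerate, PySem.Set.ofList,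
    PySem.Set.add, PySem.Set.contains, PySem.List.min?, PySem.List.pyGetD, PySem.List.pyGet?,
    PySem.List.pyIdx?, List.flatMap, List.filterMap]

theorem rec_foldl_eq (labels : List String) (acc : List String) :
    labels.foldl (fun recs l =>
      recs ++ [if PySem.Str.isIn "Nitrogen" l then
        "Apply nitrogen-rich fertilizer; consider split application before rainfall."
      else if PySem.Str.isIn "Water" l then
        "Increase irrigation frequency; check for clogged drip lines."
      else if PySem.Str.isIn "Fungal" l || PySem.Str.isIn "Blight" l || PySem.Str.isIn "Mildew" l
              || PySem.Str.isIn "Rust" l || PySem.Str.isIn "Leaf Spot" l then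
        "Use a broad-spectrum fungicide and remove heavily infected leaves."
      else if PySem.Str.isIn "Weed" l then
        "Apply pre-emergent herbicide and perform mechanical weeding."
      else
        "Scout the field and send a sample to lab for confirmation."]) acc
    = acc ++ recommendation_for_alt labels := by
  induction labels generalizing acc with
  | nil => simp [recommendation_for_alt]
  | cons x xs ih =>
    simp only [List.foldl_cons, ih, recommendation_for_alt, List.map_cons, rec_step_eq x]
    simp

-- ===== VERDICT =====
theorem recommendation_for_spec : Claim_equal_recommendation_for := by
  intro labels _
  unfold Spec_recommendation_for recommendation_for
  have h := rec_foldl_eq labels []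
  simp only [List.nil_append] at h
  rw [← h]
  congr 1
  funext recs l
  split_ifs <;> rfl
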